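-- pv_equiv track=rewrite | github.com/Huda-Mansoori/ai-community-event-board | services/ai_service.py | recommend_events
-- ===== SOURCE A (Python) =====
-- def recommend_events(user_interests, all_events):
--     """Use Gemini to recommend events based on user interests."""
--     interests = user_interests or []
--     events = all_events or []
--
--     if not events:
--         return []
--
--     normalized_interests = [str(item).lower() for item in interests if str(item).strip()]
--
--     if not normalized_interests:
--         return events[:3]
--
--     scored = []
--     for event in events:
--         text_blob = " ".join([
--             str(event.get("title", "")),
--             str(event.get("description", "")),
--             str(event.get("category", ""))
--         ]).lower()
--
--         score = sum(1 for term in normalized_interests if term in text_blob)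
--         scored.append((score, event))
--
--     scored.sort(key=lambda item: item[0], reverse=True)
--     top_matches = [event for score, event in scored if score > 0][:5]
--
--     return top_matches or events[:3]
-- ===== SOURCE B (Python) =====
-- def recommend_events(user_interests, all_events):
--     """Score events once, then collect the distinct positive score levels
--     high-to-low, one filtering pass per level (no pair sort, no dict)."""
--     interests = [str(t).lower() for t in (user_interests or []) if str(t).strip()]
--     events = all_events or []
--
--     if not events:
--         return []
--     if not interests:
--         return events[:3]
--
--     pairs = [(_score(e, interests), e) for e in events]
--
--     levels = sorted({s for s, _ in pairs if s > 0}, reverse=True)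
--     top = []
--     for lvl in levels:
--         top += [e for s, e in pairs if s == lvl]
--     top = top[:5]
--
--     return top or events[:3]
--
--
-- def _score(event, interests):
--     blob = " ".join([
--         str(event.get("title", "")),
--         str(event.get("description", "")),
--         str(event.get("category", ""))
--     ]).lower()
--     return len([t for t in interests if t in blob])
-- ===== Notes on version B (the rewrite author's own statement) =====
-- stated objective: alternative
-- what changed: Instead of stably sorting the (score, event) pair list and filtering positives, B sorts only the set of distinct positive score values descending and collects each level with one filtering pass over the scored pairs, cutting at 5.
import Mathlib
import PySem

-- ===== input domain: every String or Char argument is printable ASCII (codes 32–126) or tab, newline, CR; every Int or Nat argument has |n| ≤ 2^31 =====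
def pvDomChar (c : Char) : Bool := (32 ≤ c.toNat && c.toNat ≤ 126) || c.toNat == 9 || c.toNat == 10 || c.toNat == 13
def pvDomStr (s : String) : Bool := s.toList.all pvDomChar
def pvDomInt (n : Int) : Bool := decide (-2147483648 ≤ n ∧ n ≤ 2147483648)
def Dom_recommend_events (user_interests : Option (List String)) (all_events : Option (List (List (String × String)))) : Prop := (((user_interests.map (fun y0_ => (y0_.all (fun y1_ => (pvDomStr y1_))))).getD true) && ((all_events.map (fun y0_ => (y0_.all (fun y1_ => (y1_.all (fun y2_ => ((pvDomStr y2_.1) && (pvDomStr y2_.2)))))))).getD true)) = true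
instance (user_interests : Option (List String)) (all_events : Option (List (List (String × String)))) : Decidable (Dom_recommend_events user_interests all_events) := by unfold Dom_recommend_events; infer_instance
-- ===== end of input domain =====

-- B replaces A's sort-then-filter by one filtering pass per score level, walked from the
-- highest possible score down to 1; equivalence of the RETURN value is proved
-- (A also sorts its local list in place, which no caller observes).

-- ===== PORT A =====
-- per-event score of A's loop body: blob of title/description/category, then
-- sum(1 for term in normalized_interests if term in text_blob)
def pvScoreA (normalized_interests : List String) (event : List (String × String)) : Int :=
  let text_blob := PySem.Str.lower (PySem.Str.join " "
    [(PySem.Dict.mk event).getD "title" "",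
     (PySem.Dict.mk event).getD "description" "",
     (PySem.Dict.mk event).getD "category" ""])
  (normalized_interests.map (fun term => if PySem.Str.isIn term text_blob then (1 : Int) else 0)).sum

def recommend_events (user_interests : Option (List String)) (all_events : Option (List (List (String × String)))) : List (List (String × String)) :=
  let interests := user_interests.getD []
  let events := all_events.getD []
  if events = [] then []
  else
    let normalized_interests := (interests.filter (fun item => PySem.Str.strip item != "")).map (fun item => PySem.Str.lower item)
    if normalized_interests = [] then PySem.List.slice events none (some 3)
    else
      let scored := events.foldl (fun scored event => scored ++ [(pvScoreA normalized_interests event, event)]) []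
      let scored_sorted := PySem.List.sorted scored (fun item => item.1) true
      let top_matches := PySem.List.slice ((scored_sorted.filter (fun item => decide (0 < item.1))).map (fun item => item.2)) none (some 5)
      if top_matches = [] then PySem.List.slice events none (some 3) else top_matches

-- ===== PORT B =====
-- Source B's _score helper: the blob, then len([t for t in interests if t in blob])
def pvBlob (event : List (String × String)) : String :=
  PySem.Str.lower (PySem.Str.join " "
    [(PySem.Dict.mk event).getD "title" "",
     (PySem.Dict.mk event).getD "description" "",
     (PySem.Dict.mk event).getD "category" ""])

def pvScoreB (event : List (String × String)) (interests : List String) : Int :=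
  ((interests.filter (fun t => PySem.Str.isIn t (pvBlob event))).length : Int)

def recommend_events_alt (user_interests : Option (List String)) (all_events : Option (List (List (String × String)))) : List (List (String × String)) :=
  let interests := ((user_interests.getD []).filter (fun t => PySem.Str.strip t != "")).map (fun t => PySem.Str.lower t)
  let events := all_events.getD []
  if events = [] then []
  else if interests = [] then events.take 3
  else
    let pairs := events.map (fun e => (pvScoreB e interests, e))
    -- levels = sorted({s for s, _ in pairs if s > 0}, reverse=True)
    let levels := PySem.List.sorted (PySem.Set.ofList ((pairs.filter (fun p => decide (0 < p.1))).map (fun p => p.1))) (fun s => s) true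
    -- for lvl in levels: top += [e for s, e in pairs if s == lvl]
    let top := (levels.foldl (fun top lvl => top ++ (pairs.filter (fun p => p.1 == lvl)).map (fun p => p.2)) []).take 5
    if top = [] then events.take 3 else top

-- ===== PRECONDITION & SPEC =====
def Spec_recommend_events (user_interests : Option (List String)) (all_events : Option (List (List (String × String)))) (out : List (List (String × String))) : Prop := out = recommend_events_alt user_interests all_events
instance (user_interests : Option (List String)) (all_events : Option (List (List (String × String)))) (out : List (List (String × String))) : Decidable (Spec_recommend_events user_interests all_events out) := by unfold Spec_recommend_events; infer_instance

-- ===== CLAIM (what is proved, stated in full; the proofs are below) =====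
def Claim_equal_recommend_events : Prop := ∀ (user_interests : Option (List String)) (all_events : Option (List (List (String × String)))), Dom_recommend_events user_interests all_events → Spec_recommend_events user_interests all_events (recommend_events user_interests all_events)

-- ===== LEMMAS AND PROOFS =====

theorem pvScoreA_eq (ni : List String) (e : List (String × String)) :
    pvScoreA ni e = pvScoreB e ni := by
  unfold pvScoreA pvScoreB pvBlob
  rw [PySem.List.sum_map_ite_one_zero, List.countP_eq_length_filter]

theorem pvScoreA_bounds (ni : List String) (e : List (String × String)) :
    0 ≤ pvScoreA ni e ∧ pvScoreA ni e ≤ (ni.length : Int) := by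
  unfold pvScoreA
  rw [PySem.List.sum_map_ite_one_zero]
  constructor
  · positivity
  · exact_mod_cast List.countP_le_length

theorem insertBy_nil {α : Type} (before : α → α → Bool) (x : α) :
    PySem.List.insertBy before x [] = [x] := rfl

theorem insertBy_cons {α : Type} (before : α → α → Bool) (x y : α) (ys : List α) :
    PySem.List.insertBy before x (y :: ys) =
      if before x y then x :: y :: ys else y :: PySem.List.insertBy before x ys := rfl

theorem insertBy_append_mid {α : Type} (before : α → α → Bool) (x : α) (ys zs : List α)
    (h1 : ∀ y ∈ ys, before x y = false)
    (h2 : ∀ z, zs.head? = some z → before x z = true) :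
    PySem.List.insertBy before x (ys ++ zs) = ys ++ x :: zs := by
  induction ys with
  | nil =>
    cases zs with
    | nil => simp [insertBy_nil]
    | cons z zs => simp [insertBy_cons, h2 z rfl]
  | cons y ys ih =>
    simp only [List.cons_append, insertBy_cons, h1 y (by simp)]
    simp only [Bool.false_eq_true, if_false, List.cons.injEq, true_and]
    exact ih (fun y hy => h1 y (by simp [hy]))

theorem pyRange_neg_one_append (a m b : Int) (hb : b ≤ m) (ha : m ≤ a) :
    PySem.List.pyRange a b (-1) = PySem.List.pyRange a m (-1) ++ PySem.List.pyRange m b (-1) := by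
  rw [PySem.List.pyRange_neg_one_eq_reverse, PySem.List.pyRange_neg_one_eq_reverse,
    PySem.List.pyRange_neg_one_eq_reverse, ← List.reverse_append,
    ← PySem.List.pyRange_one_append (b + 1) (m + 1) (a + 1) (by omega) (by omega)]

theorem pyRange_neg_one_singleton (k : Int) : PySem.List.pyRange k (k - 1) (-1) = [k] := by
  rw [PySem.List.pyRange_neg_one_cons (by omega), PySem.List.pyRange_neg_one_eq_nil (by omega)]

theorem filter_flatMap {α β : Type} (R : List α) (g : α → List β) (p : β → Bool) :
    (R.flatMap g).filter p = R.flatMap (fun s => (g s).filter p) := by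
  induction R with
  | nil => rfl
  | cons r R ih => simp [List.flatMap_cons, List.filter_append, ih]

theorem map_flatMap' {α β γ : Type} (R : List α) (g : α → List β) (f : β → γ) :
    (R.flatMap g).map f = R.flatMap (fun s => (g s).map f) := by
  induction R with
  | nil => rfl
  | cons r R ih => simp [List.flatMap_cons, ih]

theorem flatMap_congr_mem {α β : Type} {R : List α} {f g : α → List β}
    (h : ∀ s ∈ R, f s = g s) : R.flatMap f = R.flatMap g := by
  induction R with
  | nil => rfl
  | cons r R ih =>
    simp only [List.flatMap_cons, h r (by simp)]
    rw [ih (fun s hs => h s (by simp [hs]))]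

-- the stable descending sort of (score, payload) pairs with scores in [0, n] is the
-- concatenation of the score buckets, scores n, n-1, …, 0, each bucket in list order
theorem sorted_desc_buckets {α : Type} (n : Int) (l : List (Int × α))
    (h : ∀ p ∈ l, 0 ≤ p.1 ∧ p.1 ≤ n) :
    PySem.List.sorted l (fun p => p.1) true
      = (PySem.List.pyRange n (-1) (-1)).flatMap (fun s => l.filter (fun p => p.1 == s)) := by
  induction l using List.reverseRecOn with
  | nil => simp [PySem.List.sorted_rev_eq_foldl_insertBy, List.flatMap_eq_nil_iff]
  | append_singleton l x ih =>
    obtain ⟨hx0, hxn⟩ := h x (by simp)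
    rw [PySem.List.sorted_rev_eq_foldl_insertBy, List.foldl_append, List.foldl_cons,
      List.foldl_nil, ← PySem.List.sorted_rev_eq_foldl_insertBy,
      ih (fun p hp => h p (by simp [hp]))]
    have hsplit : PySem.List.pyRange n (-1) (-1)
        = (PySem.List.pyRange n x.1 (-1) ++ [x.1]) ++ PySem.List.pyRange (x.1 - 1) (-1) (-1) := by
      rw [pyRange_neg_one_append n (x.1 - 1) (-1) (by omega) (by omega),
        pyRange_neg_one_append n x.1 (x.1 - 1) (by omega) (by omega),
        pyRange_neg_one_singleton, List.append_assoc]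
    rw [hsplit]
    simp only [List.flatMap_append, List.flatMap_cons, List.flatMap_nil, List.append_nil]
    rw [insertBy_append_mid _ x
      (List.flatMap (fun s => l.filter (fun p => p.1 == s)) (PySem.List.pyRange n x.1 (-1))
        ++ l.filter (fun p => p.1 == x.1))
      (List.flatMap (fun s => l.filter (fun p => p.1 == s)) (PySem.List.pyRange (x.1 - 1) (-1) (-1)))
      ?h1 ?h2]
    case h1 =>
      intro y hy
      have hy1 : x.1 ≤ y.1 := by
        rcases List.mem_append.mp hy with hy | hy
        · obtain ⟨s, hs, hyf⟩ := List.mem_flatMap.mp hy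
          have := (PySem.List.mem_pyRange_neg_one.mp hs).1
          have := (List.mem_filter.mp hyf).2
          simp only [beq_iff_eq] at this
          omega
        · have := (List.mem_filter.mp hy).2
          simp only [beq_iff_eq] at this
          omega
      simp only [decide_eq_false_iff_not]
      omega
    case h2 =>
      intro z hz
      obtain ⟨s, hs, hzf⟩ := List.mem_flatMap.mp (List.mem_of_mem_head? hz)
      have := (PySem.List.mem_pyRange_neg_one.mp hs).2
      have := (List.mem_filter.mp hzf).2
      simp only [beq_iff_eq] at this
      simp only [decide_eq_true_eq]
      omega
    have hne : ∀ s : Int, s ≠ x.1 →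
        (l ++ [x]).filter (fun p => p.1 == s) = l.filter (fun p => p.1 == s) := by
      intro s hs
      rw [List.filter_append]
      simp [Ne.symm hs]
    have hk : (l ++ [x]).filter (fun p => p.1 == x.1) = l.filter (fun p => p.1 == x.1) ++ [x] := by
      rw [List.filter_append]; simp
    rw [flatMap_congr_mem (f := fun s => (l ++ [x]).filter (fun p => p.1 == s))
        (g := fun s => l.filter (fun p => p.1 == s))
        (fun s hs => hne s (by have := (PySem.List.mem_pyRange_neg_one.mp hs).1; omega)),
      flatMap_congr_mem (R := PySem.List.pyRange (x.1 - 1) (-1) (-1))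
        (f := fun s => (l ++ [x]).filter (fun p => p.1 == s))
        (g := fun s => l.filter (fun p => p.1 == s))
        (fun s hs => hne s (by have := (PySem.List.mem_pyRange_neg_one.mp hs).2; omega)),
      hk]
    simp

theorem pyRange_neg_one_pairwise_gt (a b : Int) :
    (PySem.List.pyRange a b (-1)).Pairwise (fun x y => y < x) := by
  rw [PySem.List.pyRange_neg_one]
  exact (List.pairwise_lt_range).map _ (fun h => by omega)

theorem flatMap_eq_flatMap_filter {α β : Type} (L : List α) (q : α → Bool) (f : α → List β)
    (h : ∀ s ∈ L, q s = false → f s = []) :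
    L.flatMap f = (L.filter q).flatMap f := by
  induction L with
  | nil => rfl
  | cons x L ih =>
    rw [List.flatMap_cons, List.filter_cons]
    by_cases hq : q x
    · simp only [hq, if_true, List.flatMap_cons]
      rw [ih (fun s hs => h s (by simp [hs]))]
    · rw [h x (by simp) (by simpa using hq)]
      simp only [hq, List.nil_append]
      exact ih (fun s hs => h s (by simp [hs]))

-- the two "top" lists coincide before slicing
theorem tops_eq (events : List (List (String × String))) (ni : List String) :
    ((PySem.List.sorted (events.foldl (fun scored event => scored ++ [(pvScoreA ni event, event)]) [])
        (fun item => item.1) true).filter (fun item => decide (0 < item.1))).map (fun item => item.2)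
      = (PySem.List.sorted (PySem.Set.ofList (((events.map (fun e => (pvScoreB e ni, e))).filter (fun p => decide (0 < p.1))).map (fun p => p.1))) (fun s => s) true).foldl
          (fun top lvl => top ++ ((events.map (fun e => (pvScoreB e ni, e))).filter (fun p => p.1 == lvl)).map (fun p => p.2)) [] := by
  have hscored : events.foldl (fun scored event => scored ++ [(pvScoreA ni event, event)]) []
      = events.map (fun event => (pvScoreB event ni, event)) := by
    rw [PySem.List.foldl_append_singleton_eq_map, List.nil_append]
    exact List.map_congr_left (fun e _ => by rw [pvScoreA_eq])
  set sc := events.map (fun e => (pvScoreB e ni, e)) with hsc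
  have hbnd : ∀ p ∈ sc, 0 ≤ p.1 ∧ p.1 ≤ (ni.length : Int) := by
    intro p hp
    rw [hsc] at hp
    obtain ⟨e, _, rfl⟩ := List.mem_map.mp hp
    rw [show (pvScoreB e ni, e).1 = pvScoreA ni e from (pvScoreA_eq ni e).symm]
    exact pvScoreA_bounds ni e
  set X := PySem.Set.ofList ((sc.filter (fun p => decide (0 < p.1))).map (fun p => p.1)) with hX
  have hXmem : ∀ s : Int, s ∈ X ↔ ∃ p ∈ sc, 0 < p.1 ∧ p.1 = s := by
    intro s
    rw [hX, PySem.Set.mem_ofList]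
    simp only [List.mem_map, List.mem_filter, decide_eq_true_eq]
    constructor
    · rintro ⟨p, ⟨hp, h0⟩, rfl⟩; exact ⟨p, hp, h0, rfl⟩
    · rintro ⟨p, hp, h0, rfl⟩; exact ⟨p, ⟨hp, h0⟩, rfl⟩
  -- the sorted distinct positive levels are exactly range(n, 0, -1) restricted to X
  have hlev : PySem.List.sorted X (fun s => s) true
      = (PySem.List.pyRange (ni.length : Int) 0 (-1)).filter (fun s => decide (s ∈ X)) := by
    have hpw : ((PySem.List.pyRange (ni.length : Int) 0 (-1)).filter (fun s => decide (s ∈ X))).Pairwise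
        (fun a b => (fun s : Int => s) b < (fun s : Int => s) a) :=
      (pyRange_neg_one_pairwise_gt (ni.length : Int) 0).filter _
    apply PySem.List.sorted_rev_eq_of_perm_of_pairwise_gt X _ (fun s => s) _ hpw
    rw [List.perm_ext_iff_of_nodup (hpw.imp (fun h => by simp only [] at h; omega)) (PySem.Set.nodup_ofList _)]
    intro s
    rw [List.mem_filter, PySem.List.mem_pyRange_neg_one, decide_eq_true_eq]
    constructor
    · exact fun h => h.2
    · intro hs
      refine ⟨?_, hs⟩
      obtain ⟨p, hp, h0, rfl⟩ := (hXmem s).mp hs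
      exact ⟨h0, (hbnd p hp).2⟩
  rw [hscored, PySem.List.foldl_append_eq_flatMap, List.nil_append, hlev,
    ← flatMap_eq_flatMap_filter _ _ _ ?hnil]
  case hnil =>
    intro s hs hq
    rw [List.filter_eq_nil_iff.mpr, List.map_nil]
    intro p hp
    simp only [beq_iff_eq]
    intro hps
    have h0 : 0 < s := (PySem.List.mem_pyRange_neg_one.mp hs).1
    have : s ∈ X := (hXmem s).mpr ⟨p, hp, by omega, hps⟩
    simp [this] at hq
  rw [sorted_desc_buckets (ni.length : Int) sc hbnd]
  have hsplit : PySem.List.pyRange (ni.length : Int) (-1) (-1)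
      = PySem.List.pyRange (ni.length : Int) 0 (-1) ++ [(0 : Int)] := by
    rw [pyRange_neg_one_append (ni.length : Int) 0 (-1) (by omega) (by positivity)]
    congr 1
  rw [hsplit, List.flatMap_append, List.filter_append, List.map_append, filter_flatMap, map_flatMap']
  have h0 : (([(0 : Int)].flatMap (fun s => sc.filter (fun p => p.1 == s))).filter
      (fun item => decide (0 < item.1))).map (fun item => item.2) = [] := by
    simp only [List.flatMap_cons, List.flatMap_nil, List.append_nil]
    rw [List.filter_filter]
    have : ∀ p ∈ sc, (decide (0 < p.1) && (p.1 == (0 : Int))) = false := by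
      intro p _
      by_cases h : p.1 = 0 <;> simp [h]
    rw [List.filter_eq_nil_iff.mpr (fun p hp => by simp [this p hp])]
    rfl
  simp only [List.flatMap_cons, List.flatMap_nil, List.append_nil] at h0 ⊢
  rw [h0, List.append_nil]
  apply flatMap_congr_mem
  intro s hs
  have hs1 : 0 < s := (PySem.List.mem_pyRange_neg_one.mp hs).1
  congr 1
  apply List.filter_eq_self.mpr
  intro p hp
  have := (List.mem_filter.mp hp).2
  simp only [beq_iff_eq] at this
  simp [this, hs1]

-- ===== VERDICT (by name: the statement is the Claim_ definition above) =====
theorem recommend_events_spec : Claim_equal_recommend_events := by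
  intro user_interests all_events _
  unfold Spec_recommend_events
  simp only [recommend_events, recommend_events_alt]
  by_cases hev : all_events.getD [] = []
  · simp [hev]
  · simp only [if_neg hev]
    by_cases hni : ((user_interests.getD []).filter (fun item => PySem.Str.strip item != "")).map (fun item => PySem.Str.lower item) = []
    · have h3 : PySem.List.slice (all_events.getD []) none (some 3) = (all_events.getD []).take 3 := by
        rw [PySem.List.slice_to _ (by norm_num)]; rfl
      simp [hni, h3]
    · simp only [if_neg hni]
      rw [tops_eq, PySem.List.slice_to _ (by norm_num), PySem.List.slice_to _ (by norm_num)]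
      simp
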